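-- pv_equiv track=rewrite | github.com/VishalPallagani/gympulse | backend/services/db.py | _build_session_metrics
-- ===== SOURCE A (Python) =====
-- from collections import defaultdict
-- from typing import Any
--
-- def _build_session_metrics(sessions: list[dict[str, Any]]) -> tuple[dict[str, int], dict[str, str]]:
--     sessions_by_user: dict[str, int] = defaultdict(int)
--     last_active_by_user: dict[str, str] = {}
--
--     for row in sessions:
--         user_id = str(row.get("user_id") or "")
--         if not user_id:
--             continue
--         sessions_by_user[user_id] += 1
--         logged_at = str(row.get("logged_at") or "")
--         if logged_at and logged_at > str(last_active_by_user.get(user_id, "")):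
--             last_active_by_user[user_id] = logged_at
--
--     return sessions_by_user, last_active_by_user
-- ===== SOURCE B (Python) =====
-- def _build_session_metrics(sessions):
--     # group-then-aggregate: one pass builds per-user lists, aggregates are mapped off them
--     pairs = [(u, t)
--              for u, t in ((str(r.get("user_id") or ""), str(r.get("logged_at") or ""))
--                           for r in sessions)
--              if u]
--     groups = {}
--     for u, t in pairs:
--         groups.setdefault(u, []).append(t)
--     times = {}
--     for u, t in pairs:
--         if t:
--             times.setdefault(u, []).append(t)
--     sessions_by_user = {u: len(ts) for u, ts in groups.items()}
--     last_active_by_user = {u: max(ts) for u, ts in times.items()}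
--     return sessions_by_user, last_active_by_user
-- ===== Notes on version B (the rewrite author's own statement) =====
-- stated objective: alternative
-- what changed: A interleaves a running per-user count and running max in one stateful loop; B first extracts and groups the (user_id, logged_at) pairs into per-user lists and then maps the aggregates (list length for the counts, max for last-active) over the groups.
import Mathlib
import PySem

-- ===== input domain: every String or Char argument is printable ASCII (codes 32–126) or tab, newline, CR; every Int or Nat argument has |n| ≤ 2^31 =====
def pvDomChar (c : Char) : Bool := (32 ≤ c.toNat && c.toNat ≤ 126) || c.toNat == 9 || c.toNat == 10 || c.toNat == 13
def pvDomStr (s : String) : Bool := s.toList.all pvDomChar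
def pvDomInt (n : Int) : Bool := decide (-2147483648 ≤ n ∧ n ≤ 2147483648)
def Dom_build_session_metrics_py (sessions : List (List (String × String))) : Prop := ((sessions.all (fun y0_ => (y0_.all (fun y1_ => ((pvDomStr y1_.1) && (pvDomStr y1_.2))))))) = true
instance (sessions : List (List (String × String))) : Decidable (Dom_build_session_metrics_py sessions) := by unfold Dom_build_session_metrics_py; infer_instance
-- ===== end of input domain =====

-- B replaces A's interleaved running count / running max with a group-then-aggregate
-- decomposition (grouping passes, then counts = lengths, last-active = max per group); objective: alternative.

-- str(row.get(k) or "") : first-match association-list lookup, missing/empty -> ""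
def pvRowGet (row : List (String × String)) (k : String) : String :=
  (PySem.Dict.mk row).getD k ""

-- ===== PORT A =====
-- A's loop body, one row: skip empty user_id, bump count (defaultdict += 1 = modify),
-- update the running max when logged_at is non-empty and greater
def pvBodyA (st : PySem.Dict String Int × PySem.Dict String String)
    (row : List (String × String)) : PySem.Dict String Int × PySem.Dict String String :=
  let user_id := pvRowGet row "user_id"
  if user_id = "" then st
  else
    let counts := st.1.modify user_id 0 (· + 1)
    let logged_at := pvRowGet row "logged_at"
    if logged_at ≠ "" ∧ st.2.getD user_id "" < logged_at then
      (counts, st.2.insert user_id logged_at)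
    else (counts, st.2)

def build_session_metrics_py (sessions : List (List (String × String))) :
    (List (String × Int)) × (List (String × String)) :=
  let st := sessions.foldl pvBodyA (PySem.Dict.empty, PySem.Dict.empty)
  (st.1.items, st.2.items)

-- ===== PORT B =====
def build_session_metrics_py_alt (sessions : List (List (String × String))) :
    (List (String × Int)) × (List (String × String)) :=
  let pairs := (sessions.map (fun r => (pvRowGet r "user_id", pvRowGet r "logged_at"))).filter
      (fun p => p.1 != "")
  let groups := pairs.foldl
      (fun (d : PySem.Dict String (List String)) p => d.modify p.1 [] (· ++ [p.2]))
      PySem.Dict.empty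
  let times := pairs.foldl
      (fun (d : PySem.Dict String (List String)) p =>
        if p.2 ≠ "" then d.modify p.1 [] (· ++ [p.2]) else d)
      PySem.Dict.empty
  (groups.items.map (fun p => (p.1, (p.2.length : Int))),
   times.items.map (fun p => (p.1, PySem.List.maxD p.2 (fun x => x) "")))

-- ===== PRECONDITION & SPEC =====
def Spec_build_session_metrics_py (sessions : List (List (String × String))) (out : (List (String × Int)) × (List (String × String))) : Prop := out = build_session_metrics_py_alt sessions
instance (sessions : List (List (String × String))) (out : (List (String × Int)) × (List (String × String))) : Decidable (Spec_build_session_metrics_py sessions out) := by unfold Spec_build_session_metrics_py; infer_instance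

-- ===== CLAIM (what is proved, stated in full; the proofs are below) =====
def Claim_equal_build_session_metrics_py : Prop := ∀ (sessions : List (List (String × String))), Dom_build_session_metrics_py sessions → Spec_build_session_metrics_py sessions (build_session_metrics_py sessions)

-- ===== LEMMAS AND PROOFS =====

-- A's loop body on one already-extracted (user_id, logged_at) pair
def pvStepA (st : PySem.Dict String Int × PySem.Dict String String) (p : String × String) :
    PySem.Dict String Int × PySem.Dict String String :=
  (st.1.modify p.1 0 (· + 1),
   if p.2 ≠ "" ∧ st.2.getD p.1 "" < p.2 then st.2.insert p.1 p.2 else st.2)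

-- B's two grouping steps
def pvStepG (d : PySem.Dict String (List String)) (p : String × String) :
    PySem.Dict String (List String) := d.modify p.1 [] (· ++ [p.2])
def pvStepM (d : PySem.Dict String (List String)) (p : String × String) :
    PySem.Dict String (List String) :=
  if p.2 ≠ "" then d.modify p.1 [] (· ++ [p.2]) else d

-- aggregates mapped over a grouping dict
def pvMapLen (g : PySem.Dict String (List String)) : PySem.Dict String Int :=
  PySem.Dict.mk (g.items.map (fun p => (p.1, (p.2.length : Int))))
def pvMapMax (m : PySem.Dict String (List String)) : PySem.Dict String String :=
  PySem.Dict.mk (m.items.map (fun p => (p.1, PySem.List.maxD p.2 (fun x => x) "")))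

lemma pv_contains_mapLen (g : PySem.Dict String (List String)) (u : String) :
    (pvMapLen g).contains u = g.contains u := by
  simp [pvMapLen, PySem.Dict.contains, List.any_map]; rfl

lemma pv_contains_mapMax (m : PySem.Dict String (List String)) (u : String) :
    (pvMapMax m).contains u = m.contains u := by
  simp [pvMapMax, PySem.Dict.contains, List.any_map]; rfl

lemma pv_find?_map {ν : Type} (f : String × List String → String × ν)
    (hf : ∀ p, (f p).1 = p.1) (items : List (String × List String)) (u : String) :
    List.find? (fun p => p.1 == u) (items.map f) =
      (items.find? (fun p => p.1 == u)).map f := by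
  induction items with
  | nil => rfl
  | cons p ps ih => by_cases h : p.1 == u <;> simp [hf, h, ih]

lemma pv_getD_mapLen (g : PySem.Dict String (List String)) (u : String) :
    (pvMapLen g).getD u 0 = ((g.getD u []).length : Int) := by
  simp only [pvMapLen, PySem.Dict.getD, PySem.Dict.get?]
  rw [pv_find?_map (fun p => (p.1, (p.2.length : Int))) (fun _ => rfl)]
  cases h : List.find? (fun p => p.1 == u) g.items <;> simp

lemma pv_getD_mapMax (m : PySem.Dict String (List String)) (u : String) :
    (pvMapMax m).getD u "" = PySem.List.maxD (m.getD u []) (fun x => x) "" := by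
  simp only [pvMapMax, PySem.Dict.getD, PySem.Dict.get?]
  rw [pv_find?_map (fun p => (p.1, PySem.List.maxD p.2 (fun x => x) "")) (fun _ => rfl)]
  cases h : List.find? (fun p => p.1 == u) m.items <;>
    simp [PySem.List.maxD, PySem.List.max?]

lemma pv_empty_lt (t : String) (h : t ≠ "") : "" < t := by
  rw [String.lt_iff_toList_lt]
  cases ht : t.toList with
  | nil => exact absurd (String.toList_inj.mp (by rw [ht]; rfl)) h
  | cons c cs => exact List.Lex.nil

lemma pv_maxD_append (ts : List String) (t : String) (ht : t ≠ "") :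
    PySem.List.maxD (ts ++ [t]) (fun x => x) "" =
      if PySem.List.maxD ts (fun x => x) "" < t then t
      else PySem.List.maxD ts (fun x => x) "" := by
  cases ts with
  | nil =>
      rw [List.nil_append, PySem.List.maxD_id_cons, List.foldl_nil, PySem.List.maxD_nil,
        if_pos (pv_empty_lt t ht)]
  | cons x xs =>
      rw [List.cons_append, PySem.List.maxD_id_cons, PySem.List.maxD_id_cons,
        List.foldl_append, List.foldl_cons, List.foldl_nil, max_def]
      split_ifs with h1 h2 h3
      · rfl
      · exact (le_antisymm h1 (not_lt.mp h2)).symm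
      · exact absurd h3.le h1
      · rfl

lemma pv_mapLen_insert (g : PySem.Dict String (List String)) (u t : String) :
    pvMapLen (g.insert u (g.getD u [] ++ [t])) =
      (pvMapLen g).insert u ((pvMapLen g).getD u 0 + 1) := by
  rw [pv_getD_mapLen]
  by_cases hc : g.contains u = true
  · apply PySem.Dict.ext
    rw [PySem.Dict.items_insert_of_contains _ _ (by rw [pv_contains_mapLen]; exact hc)]
    show ((g.insert u (g.getD u [] ++ [t])).items.map (fun p => (p.1, (p.2.length : Int)))) = _
    rw [PySem.Dict.items_insert_of_contains _ _ hc]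
    simp only [pvMapLen, List.map_map]
    apply List.map_congr_left
    intro p _
    by_cases hp : (p.1 == u) = true <;> simp [hp, Function.comp]
  · have hc' : g.contains u = false := by simpa using hc
    apply PySem.Dict.ext
    rw [PySem.Dict.items_insert_of_not_contains _ _ (by rw [pv_contains_mapLen]; exact hc')]
    show ((g.insert u (g.getD u [] ++ [t])).items.map (fun p => (p.1, (p.2.length : Int)))) = _
    rw [PySem.Dict.items_insert_of_not_contains _ _ hc',
        PySem.Dict.getD_of_not_contains _ _ hc']
    simp [pvMapLen]

lemma pv_mapMax_insert (m : PySem.Dict String (List String)) (hm : m.keys.Nodup)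
    (u t : String) (ht : t ≠ "") :
    pvMapMax (m.insert u (m.getD u [] ++ [t])) =
      (if (pvMapMax m).getD u "" < t then (pvMapMax m).insert u t else pvMapMax m) := by
  rw [pv_getD_mapMax]
  by_cases hc : m.contains u = true
  · by_cases hlt : PySem.List.maxD (m.getD u []) (fun x => x) "" < t
    · rw [if_pos hlt]
      apply PySem.Dict.ext
      rw [PySem.Dict.items_insert_of_contains _ _ (by rw [pv_contains_mapMax]; exact hc)]
      show ((m.insert u (m.getD u [] ++ [t])).items.map
          (fun p => (p.1, PySem.List.maxD p.2 (fun x => x) ""))) = _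
      rw [PySem.Dict.items_insert_of_contains _ _ hc]
      simp only [pvMapMax, List.map_map]
      apply List.map_congr_left
      intro p _
      by_cases hp : (p.1 == u) = true <;>
        simp [hp, Function.comp, pv_maxD_append _ _ ht, hlt]
    · rw [if_neg hlt]
      apply PySem.Dict.ext
      show ((m.insert u (m.getD u [] ++ [t])).items.map
          (fun p => (p.1, PySem.List.maxD p.2 (fun x => x) ""))) = _
      rw [PySem.Dict.items_insert_of_contains _ _ hc]
      simp only [pvMapMax, List.map_map]
      apply List.map_congr_left
      intro p hp
      by_cases hpk : (p.1 == u) = true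
      · have hku : p.1 = u := by simpa using hpk
        have hget : m.get? p.1 = some p.2 := by
          apply PySem.Dict.get?_of_mem_items
          · rcases p with ⟨k, v⟩; exact hp
          · exact hm
        have hval : m.getD u [] = p.2 := by
          rw [← hku]
          simp only [PySem.Dict.getD, hget, Option.getD_some]
        rw [hval] at hlt
        simp [hku, hval, Function.comp, pv_maxD_append _ _ ht, hlt]
      · simp [hpk, Function.comp]
  · have hc' : m.contains u = false := by simpa using hc
    rw [PySem.Dict.getD_of_not_contains _ _ hc',
        show PySem.List.maxD ([] : List String) (fun x => x) "" = "" from rfl,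
        if_pos (pv_empty_lt t ht)]
    apply PySem.Dict.ext
    rw [PySem.Dict.items_insert_of_not_contains _ _ (by rw [pv_contains_mapMax]; exact hc')]
    simp only [pvMapMax]
    rw [PySem.Dict.items_insert_of_not_contains _ _ hc']
    simp [PySem.List.maxD, PySem.List.max?]

lemma pv_nodup_stepM (m : PySem.Dict String (List String)) (hm : m.keys.Nodup)
    (p : String × String) : (pvStepM m p).keys.Nodup := by
  unfold pvStepM
  split_ifs
  · exact PySem.Dict.nodup_keys_insert _ _ _ hm
  · exact hm

-- one step of A's fused loop equals the mapped aggregates of one step of B's grouping loops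
lemma pv_step (g m : PySem.Dict String (List String)) (hm : m.keys.Nodup)
    (p : String × String) :
    pvStepA (pvMapLen g, pvMapMax m) p = (pvMapLen (pvStepG g p), pvMapMax (pvStepM m p)) := by
  obtain ⟨u, t⟩ := p
  refine Prod.ext ?_ ?_
  · exact (pv_mapLen_insert g u t).symm
  · show (if t ≠ "" ∧ (pvMapMax m).getD u "" < t then (pvMapMax m).insert u t else pvMapMax m) =
      pvMapMax (pvStepM m (u, t))
    by_cases ht : t = ""
    · simp [pvStepM, ht]
    · simp only [pvStepM, ne_eq, ht, not_false_eq_true, true_and, if_true]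
      show _ = pvMapMax (m.insert u (m.getD u [] ++ [t]))
      exact (pv_mapMax_insert m hm u t ht).symm

-- A's fused loop over the extracted pairs equals B's two grouping loops, mapped
lemma pv_main (ps : List (String × String)) (g m : PySem.Dict String (List String))
    (hm : m.keys.Nodup) :
    ps.foldl pvStepA (pvMapLen g, pvMapMax m) =
      (pvMapLen (ps.foldl pvStepG g), pvMapMax (ps.foldl pvStepM m)) := by
  induction ps generalizing g m with
  | nil => rfl
  | cons p ps ih =>
      simp only [List.foldl_cons, pv_step g m hm p]
      exact ih (pvStepG g p) (pvStepM m p) (pv_nodup_stepM m hm p)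

-- fusing A's loop over rows into a loop over the filtered extracted pairs
lemma pv_fuse (sessions : List (List (String × String)))
    (st : PySem.Dict String Int × PySem.Dict String String) :
    sessions.foldl pvBodyA st =
    (((sessions.map (fun r => (pvRowGet r "user_id", pvRowGet r "logged_at"))).filter
        (fun p => p.1 != "")).foldl pvStepA st) := by
  rw [List.foldl_filter, List.foldl_map]
  apply List.foldl_ext
  intro a b _
  by_cases h : pvRowGet b "user_id" = ""
  · simp [pvBodyA, h]
  · simp only [pvBodyA, pvStepA, h, if_false, bne_iff_ne, ne_eq, not_false_eq_true, if_true]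
    split_ifs <;> rfl

-- ===== VERDICT (by name: the statement is the Claim_ definition above) =====
theorem build_session_metrics_py_spec : Claim_equal_build_session_metrics_py := by
  intro sessions _
  unfold Spec_build_session_metrics_py
  show build_session_metrics_py sessions = build_session_metrics_py_alt sessions
  simp only [build_session_metrics_py, build_session_metrics_py_alt]
  rw [pv_fuse]
  have h0 : ((PySem.Dict.empty, PySem.Dict.empty) :
      PySem.Dict String Int × PySem.Dict String String) =
      (pvMapLen PySem.Dict.empty, pvMapMax PySem.Dict.empty) := rfl
  rw [h0, pv_main _ _ _ (by simp [PySem.Dict.keys, PySem.Dict.empty])]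
  rfl
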